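-- pv_equiv track=rewrite | github.com/jnyross/KiroSimpleRetirementPlanner | src/data_validator.py | _find_data_gaps
-- ===== SOURCE A (Python) =====
-- from typing import Dict, List, Tuple, Optional, Any
--
-- def _find_data_gaps(years_sorted: List[int]) -> List[Tuple[int, int]]:
--     """
--     Find gaps in the data years.
--
--     Args:
--         years_sorted: Sorted list of years
--
--     Returns:
--         List of (start_year, end_year) tuples representing gaps
--     """
--     gaps = []
--
--     for i in range(len(years_sorted) - 1):
--         current_year = years_sorted[i]
--         next_year = years_sorted[i + 1]
--
--         if next_year - current_year > 1:
--             gaps.append((current_year + 1, next_year - 1))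
--
--     return gaps
-- ===== SOURCE B (Python) =====
-- from typing import List, Tuple
--
-- def _find_data_gaps(years_sorted: List[int]) -> List[Tuple[int, int]]:
--     # Phase 1: segment the sequence into maximal runs with no upward jump > 1,
--     # kept as (first, last) pairs.  Phase 2: the gaps are exactly the spans
--     # between each adjacent pair of runs.
--     runs = []
--     for y in years_sorted:
--         if runs and y - runs[-1][1] <= 1:
--             runs[-1] = (runs[-1][0], y)
--         else:
--             runs.append((y, y))
--     return [(e1 + 1, s2 - 1) for (_, e1), (s2, _) in zip(runs, runs[1:])]
-- ===== Notes on version B (the rewrite author's own statement) =====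
-- stated objective: alternative
-- what changed: B first segments the year sequence into maximal runs with no upward jump greater than 1, kept as (first, last) pairs, and then derives the gaps as the spans between adjacent runs, instead of A's index loop appending a gap per adjacent difference.
import Mathlib
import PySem

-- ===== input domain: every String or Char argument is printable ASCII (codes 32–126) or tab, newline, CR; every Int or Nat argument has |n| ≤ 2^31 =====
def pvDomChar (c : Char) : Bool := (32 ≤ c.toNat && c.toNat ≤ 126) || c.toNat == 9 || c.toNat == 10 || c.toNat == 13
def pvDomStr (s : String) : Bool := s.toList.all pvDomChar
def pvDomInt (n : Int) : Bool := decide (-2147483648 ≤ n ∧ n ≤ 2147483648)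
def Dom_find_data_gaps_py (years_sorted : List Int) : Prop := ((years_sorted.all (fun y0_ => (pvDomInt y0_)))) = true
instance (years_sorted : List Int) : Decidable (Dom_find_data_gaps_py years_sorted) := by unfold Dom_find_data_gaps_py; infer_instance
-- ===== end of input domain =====

-- B segments the sequence into maximal runs with no upward jump > 1 (as (first, last)
-- pairs) and derives the gaps as the spans between adjacent runs (objective: alternative).

-- ===== PORT A =====
-- loop body of A: for i in range(len-1): if ys[i+1]-ys[i] > 1: gaps.append((ys[i]+1, ys[i+1]-1))
def pvStepA (years_sorted : List Int) (gaps : List (Int × Int)) (i : Int) : List (Int × Int) :=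
  let current_year := PySem.List.pyGetD years_sorted i 0
  let next_year := PySem.List.pyGetD years_sorted (i + 1) 0
  if next_year - current_year > 1 then gaps ++ [(current_year + 1, next_year - 1)] else gaps

def find_data_gaps_py (years_sorted : List Int) : List (Int × Int) :=
  (PySem.List.pyRange 0 ((years_sorted.length : Int) - 1) 1).foldl (pvStepA years_sorted) []

-- ===== PORT B =====
-- runs accumulator is kept reversed (head = last run) and reversed at the end;
-- Python's `runs[-1] = (runs[-1][0], y)` / `runs.append((y, y))` become the two branches.
def pvStepB (runs : List (Int × Int)) (y : Int) : List (Int × Int) :=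
  match runs with
  | (s, e) :: rest => if y - e ≤ 1 then (s, y) :: rest else (y, y) :: (s, e) :: rest
  | [] => [(y, y)]

def find_data_gaps_py_alt (years_sorted : List Int) : List (Int × Int) :=
  let runs := (years_sorted.foldl pvStepB []).reverse
  (runs.zip runs.tail).map (fun p => (p.1.2 + 1, p.2.1 - 1))

-- ===== PRECONDITION & SPEC =====
def Spec_find_data_gaps_py (years_sorted : List Int) (out : List (Int × Int)) : Prop := out = find_data_gaps_py_alt years_sorted
instance (years_sorted : List Int) (out : List (Int × Int)) : Decidable (Spec_find_data_gaps_py years_sorted out) := by unfold Spec_find_data_gaps_py; infer_instance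

-- ===== CLAIM (what is proved, stated in full; the proofs are below) =====
def Claim_equal_find_data_gaps_py : Prop := ∀ (years_sorted : List Int), Dom_find_data_gaps_py years_sorted → Spec_find_data_gaps_py years_sorted (find_data_gaps_py years_sorted)

-- ===== LEMMAS AND PROOFS =====

-- canonical adjacent-pair gap function both ports are reduced to
def pvG : List Int → List (Int × Int)
  | a :: b :: t => (if b - a > 1 then [(a + 1, b - 1)] else []) ++ pvG (b :: t)
  | _ => []

-- ---- A-side: the indexed fold equals pvG ----

theorem pvStepA_shift (a : Int) (ys : List Int) (acc : List (Int × Int)) (k : Nat) :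
    pvStepA (a :: ys) acc (1 + (k : Int)) = pvStepA ys acc (0 + (k : Int)) := by
  have g1 : PySem.List.pyGetD (a :: ys) (1 + (k : Int)) 0 = PySem.List.pyGetD ys (0 + (k : Int)) 0 := by
    have h1 : (1 + (k : Int)) = ((k + 1 : Nat) : Int) := by push_cast; ring
    have h0 : (0 + (k : Int)) = ((k : Nat) : Int) := by ring
    rw [h1, h0, PySem.List.pyGetD_natCast, PySem.List.pyGetD_natCast]
    simp [List.getD]
  have g2 : PySem.List.pyGetD (a :: ys) (1 + (k : Int) + 1) 0 = PySem.List.pyGetD ys (0 + (k : Int) + 1) 0 := by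
    have h1 : (1 + (k : Int) + 1) = ((k + 2 : Nat) : Int) := by push_cast; ring
    have h0 : (0 + (k : Int) + 1) = ((k + 1 : Nat) : Int) := by push_cast; ring
    rw [h1, h0, PySem.List.pyGetD_natCast, PySem.List.pyGetD_natCast]
    simp [List.getD]
  simp only [pvStepA, g1, g2]

theorem pvA_loop (xs : List Int) (acc : List (Int × Int)) :
    (PySem.List.pyRange 0 ((xs.length : Int) - 1) 1).foldl (pvStepA xs) acc = acc ++ pvG xs := by
  induction xs generalizing acc with
  | nil =>
    rw [PySem.List.pyRange_one_eq_nil (by simp)]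
    simp [pvG]
  | cons a ys ih =>
    cases ys with
    | nil =>
      rw [PySem.List.pyRange_one_eq_nil (by simp)]
      simp [pvG]
    | cons b t =>
      have hlen : ((a :: b :: t).length : Int) - 1 = (t.length : Int) + 1 := by
        simp
      rw [hlen]
      rw [PySem.List.pyRange_one_cons (by omega)]
      simp only [List.foldl_cons, zero_add]
      have hr1 : PySem.List.pyRange 1 ((t.length : Int) + 1) 1
          = (List.range t.length).map (fun k : Nat => (1 : Int) + k) := by
        rw [PySem.List.pyRange_one]
        congr 2
        omega
      have hr0 : PySem.List.pyRange 0 (((b :: t).length : Int) - 1) 1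
          = (List.range t.length).map (fun k : Nat => (0 : Int) + k) := by
        rw [PySem.List.pyRange_one]
        congr 2
        simp
      have hshift : (PySem.List.pyRange 1 ((t.length : Int) + 1) 1).foldl
            (pvStepA (a :: b :: t)) (pvStepA (a :: b :: t) acc 0)
          = (PySem.List.pyRange 0 (((b :: t).length : Int) - 1) 1).foldl
            (pvStepA (b :: t)) (pvStepA (a :: b :: t) acc 0) := by
        rw [hr1, hr0, List.foldl_map, List.foldl_map]
        congr 1
        funext acc' k
        exact pvStepA_shift a (b :: t) acc' k
      rw [hshift, ih]
      have hstep0 : pvStepA (a :: b :: t) acc 0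
          = acc ++ (if b - a > 1 then [(a + 1, b - 1)] else []) := by
        simp [pvStepA, PySem.List.pyGetD]
        split_ifs <;> simp
      rw [hstep0]
      conv_rhs => rw [pvG]
      simp

-- ---- B-side: runs-merging over a strictly increasing list equals pvG ----

-- gaps of the reversed runs accumulator, newest first
def pvGapsRev : List (Int × Int) → List (Int × Int)
  | (s2, _) :: (s1, e1) :: t => (e1 + 1, s2 - 1) :: pvGapsRev ((s1, e1) :: t)
  | _ => []

theorem pvGapsRev_head_snd (s e e' : Int) (rest : List (Int × Int)) :
    pvGapsRev ((s, e) :: rest) = pvGapsRev ((s, e') :: rest) := by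
  cases rest with
  | nil => rfl
  | cons p t => rcases p with ⟨s1, e1⟩; rfl

theorem pvGapsOf_append_single (l : List (Int × Int)) (p : Int × Int) :
    ((l ++ [p]).zip (l ++ [p]).tail).map (fun q => (q.1.2 + 1, q.2.1 - 1))
      = (l.zip l.tail).map (fun q => (q.1.2 + 1, q.2.1 - 1))
        ++ (match l.getLast? with
            | some q => [(q.2 + 1, p.1 - 1)]
            | none => []) := by
  induction l with
  | nil => simp
  | cons a l ih =>
    cases l with
    | nil => simp
    | cons b t => simpa using ih

theorem pvGapsOf_reverse (l : List (Int × Int)) :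
    ((l.reverse.zip l.reverse.tail).map (fun q => (q.1.2 + 1, q.2.1 - 1)))
      = (pvGapsRev l).reverse := by
  induction l with
  | nil => rfl
  | cons a l ih =>
    cases l with
    | nil => rfl
    | cons b t =>
      rcases a with ⟨s2, e2⟩; rcases b with ⟨s1, e1⟩
      have : ((s2, e2) :: (s1, e1) :: t).reverse = ((s1, e1) :: t).reverse ++ [(s2, e2)] := by
        simp
      rw [this, pvGapsOf_append_single, ih]
      have hlast : ((s1, e1) :: t).reverse.getLast? = some (s1, e1) := by
        simp [List.getLast?_reverse]
      rw [hlast]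
      simp [pvGapsRev]

theorem pvB_loop (t : List Int) : ∀ (s e : Int) (rest : List (Int × Int)),
    pvGapsRev (t.foldl pvStepB ((s, e) :: rest))
      = (pvG (e :: t)).reverse ++ pvGapsRev ((s, e) :: rest) := by
  induction t with
  | nil => intro s e rest; simp [pvG]
  | cons y t ih =>
    intro s e rest
    by_cases hmerge : y - e ≤ 1
    · simp only [List.foldl_cons, pvStepB, if_pos hmerge]
      rw [ih s y rest]
      rw [pvGapsRev_head_snd s y e rest]
      have : pvG (e :: y :: t) = pvG (y :: t) := by
        rw [pvG]; rw [if_neg (by omega)]; simp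
      rw [this]
    · simp only [List.foldl_cons, pvStepB, if_neg hmerge]
      rw [ih y y ((s, e) :: rest)]
      have hgap : pvG (e :: y :: t) = (e + 1, y - 1) :: pvG (y :: t) := by
        rw [pvG]; rw [if_pos (by omega)]; simp
      rw [hgap]
      have : pvGapsRev ((y, y) :: (s, e) :: rest)
          = (e + 1, y - 1) :: pvGapsRev ((s, e) :: rest) := rfl
      rw [this]
      simp

-- ===== VERDICT (by name: the statement is the Claim_ definition above) =====
theorem find_data_gaps_py_spec : Claim_equal_find_data_gaps_py := by
  intro xs _
  unfold Spec_find_data_gaps_py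
  rw [find_data_gaps_py, pvA_loop, List.nil_append]
  rw [find_data_gaps_py_alt]
  cases xs with
  | nil => decide
  | cons a t =>
    simp only [List.foldl_cons]
    have hstep : pvStepB [] a = [(a, a)] := rfl
    rw [hstep, pvGapsOf_reverse, pvB_loop t a a []]
    have h0 : pvGapsRev [(a, a)] = [] := rfl
    rw [h0, List.append_nil, List.reverse_reverse]
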